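-- pv_equiv track=rewrite | github.com/zhenghaohui/tyan | tyan_cxx_parser/tyan_cxx_parser.py | extract_skeleton
-- ===== SOURCE A (Python) =====
-- def extract_skeleton(line: str) -> str:
--     result = ""
--     for chr in line:
--         if chr == '#' or chr == "'" or chr == '(' or chr == "{":
--             break
--         result += chr
--     result += " "
--     return result
-- ===== SOURCE B (Python) =====
-- def extract_skeleton(line: str) -> str:
--     hits = [i for i in (line.find(d) for d in ('#', "'", '(', '{')) if i != -1]
--     idx = min(hits) if hits else len(line)
--     return line[:idx] + ' '
-- ===== Notes on version B (the rewrite author's own statement) =====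
-- stated objective: simpler
-- what changed: Replaced the character-by-character accumulate-with-break loop by computing the cut index as the minimum of the four str.find positions (or len(line) if none occur) and slicing once.
import Mathlib
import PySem

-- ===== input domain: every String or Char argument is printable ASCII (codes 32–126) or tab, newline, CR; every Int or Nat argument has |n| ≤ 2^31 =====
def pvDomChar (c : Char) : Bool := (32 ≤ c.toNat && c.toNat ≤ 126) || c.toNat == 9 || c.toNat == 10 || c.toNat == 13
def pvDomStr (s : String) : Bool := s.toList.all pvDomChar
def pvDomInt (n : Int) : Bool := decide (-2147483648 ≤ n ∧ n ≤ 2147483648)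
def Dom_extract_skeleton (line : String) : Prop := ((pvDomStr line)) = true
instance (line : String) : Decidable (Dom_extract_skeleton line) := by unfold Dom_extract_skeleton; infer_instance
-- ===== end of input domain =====

-- B replaces A's accumulate-with-break character loop by min of the four str.find positions plus one slice (objective: simpler).

-- ===== PORT A =====
-- the for-loop with break: accumulate chars until the first delimiter
def extract_skeleton_loop : List Char → List Char → List Char
  | [], result => result
  | c :: rest, result =>
    if c = '#' ∨ c = '\'' ∨ c = '(' ∨ c = '{' then result
    else extract_skeleton_loop rest (result ++ [c])

def extract_skeleton (line : String) : String :=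
  String.ofList (extract_skeleton_loop line.toList [] ++ [' '])

-- ===== PORT B =====
def extract_skeleton_alt (line : String) : String :=
  let s := line.toList
  let hits := (['#', '\'', '(', '{'].map (fun d => PySem.Chars.find s [d])).filter (fun i => i != -1)
  let idx : Int := match PySem.List.min? hits (fun x => x) with
    | some m => m
    | none => (s.length : Int)
  String.ofList (PySem.List.slice s none (some idx) ++ [' '])

-- ===== PRECONDITION & SPEC =====
def Spec_extract_skeleton (line : String) (out : String) : Prop := out = extract_skeleton_alt line
instance (line : String) (out : String) : Decidable (Spec_extract_skeleton line out) := by unfold Spec_extract_skeleton; infer_instance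

-- ===== CLAIM (what is proved, stated in full; the proofs are below) =====
def Claim_equal_extract_skeleton : Prop := ∀ (line : String), Dom_extract_skeleton line → Spec_extract_skeleton line (extract_skeleton line)

-- ===== LEMMAS AND PROOFS =====

-- the "keep" predicate: true on non-delimiter characters
def pvKeep (c : Char) : Bool := !(c == '#' || c == '\'' || c == '(' || c == '{')

theorem extract_skeleton_loop_eq (s : List Char) : ∀ acc,
    extract_skeleton_loop s acc = acc ++ s.takeWhile pvKeep := by
  induction s with
  | nil => intro acc; simp [extract_skeleton_loop]
  | cons c rest ih =>
    intro acc
    by_cases h : c = '#' ∨ c = '\'' ∨ c = '(' ∨ c = '{'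
    · have hk : pvKeep c = false := by
        rcases h with h|h|h|h <;> simp [pvKeep, h]
      simp [extract_skeleton_loop, h, hk]
    · have hk : pvKeep c = true := by
        simp only [pvKeep]
        push_neg at h
        simp [h.1, h.2.1, h.2.2.1, h.2.2.2]
      simp [extract_skeleton_loop, h, hk, ih]

theorem singleton_prefix_drop (s : List Char) (d : Char) (i : ℕ) :
    [d] <+: s.drop i ↔ s[i]? = some d := by
  rw [← List.head?_drop]
  generalize s.drop i = t
  constructor
  · rintro ⟨u, rfl⟩
    rfl
  · intro h
    rcases t with _ | ⟨c, u⟩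
    · simp at h
    · simp at h
      exact ⟨u, by simp [h]⟩

theorem find_single_eq (s : List Char) (d : Char) (j : ℕ)
    (hj : s[j]? = some d) (hmin : ∀ i < j, s[i]? ≠ some d) :
    PySem.Chars.find s [d] = (j : Int) := by
  have hocc : [d] <+: s.drop j := (singleton_prefix_drop s d j).2 hj
  have hin : PySem.Chars.isIn [d] s = true :=
    (PySem.Chars.exists_prefix_drop_iff_isIn [d] s).1 ⟨j, hocc⟩
  have hinf : [d] <:+: s := (PySem.Chars.isIn_iff_infix [d] s).1 hin
  have h0 : 0 ≤ PySem.Chars.find s [d] := (PySem.Chars.find_nonneg_iff s [d]).2 hinf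
  obtain ⟨hpre, hmn⟩ := PySem.Chars.find_spec h0
  set k := (PySem.Chars.find s [d]).toNat with hk
  have hkj : k = j := by
    rcases lt_trichotomy k j with h | h | h
    · exact absurd ((singleton_prefix_drop s d k).1 hpre) (hmin k h)
    · exact h
    · exact absurd hocc (hmn j h)
  have : PySem.Chars.find s [d] = (k : Int) := (Int.toNat_of_nonneg h0).symm
  rw [this, hkj]

-- every position strictly before the takeWhile length holds a kept character
theorem takeWhile_before (p : Char → Bool) (s : List Char) :
    ∀ i < (s.takeWhile p).length, ∀ c, s[i]? = some c → p c = true := by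
  induction s with
  | nil => simp
  | cons a rest ih =>
    intro i hi c hc
    by_cases hp : p a
    · rw [List.takeWhile_cons, if_pos hp] at hi
      cases i with
      | zero => simp at hc; rw [← hc]; exact hp
      | succ n =>
        simp at hi hc
        exact ih n (by omega) c hc
    · rw [List.takeWhile_cons, if_neg hp] at hi
      simp at hi
-- the character right after the takeWhile prefix (if any) is rejected
theorem takeWhile_after (p : Char → Bool) (s : List Char) :
    ∀ c, s[(s.takeWhile p).length]? = some c → p c = false := by
  induction s with
  | nil => simp
  | cons a rest ih =>
    intro c hc
    by_cases hp : p a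
    · rw [List.takeWhile_cons, if_pos hp] at hc
      simp at hc
      exact ih c hc
    · rw [List.takeWhile_cons, if_neg hp] at hc
      simp at hc
      rw [← hc]; exact eq_false_of_ne_true hp

theorem take_takeWhile (p : Char → Bool) (s : List Char) :
    s.take (s.takeWhile p).length = s.takeWhile p :=
  ((List.prefix_iff_eq_take).1 (List.takeWhile_prefix p)).symm

-- ===== VERDICT =====
theorem extract_skeleton_spec : Claim_equal_extract_skeleton := by
  intro line _
  unfold Spec_extract_skeleton extract_skeleton extract_skeleton_alt
  set s := line.toList with hs
  set n := (s.takeWhile pvKeep).length with hn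
  rw [extract_skeleton_loop_eq]
  simp only [List.nil_append]
  set hits := ((['#', '\'', '(', '{'].map (fun d => PySem.Chars.find s [d])).filter
      (fun i => i != -1)) with hhits
  have hmem : ∀ x, x ∈ hits ↔
      ((x = PySem.Chars.find s ['#'] ∨ x = PySem.Chars.find s ['\''] ∨
        x = PySem.Chars.find s ['('] ∨ x = PySem.Chars.find s ['{']) ∧ x ≠ -1) := by
    intro x
    simp [hhits, List.mem_filter]
  have hlb : ∀ x ∈ hits, (n : Int) ≤ x := by
    intro x hx
    rw [hmem] at hx
    obtain ⟨hd, hne⟩ := hx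
    have hge : -1 ≤ x := by
      rcases hd with h|h|h|h <;> rw [h] <;> exact PySem.Chars.neg_one_le_find s _
    have h0 : 0 ≤ x := by omega
    -- x points at an occurrence of a delimiter d
    obtain ⟨d, hxd, hdk : pvKeep d = false⟩ :
        ∃ d, PySem.Chars.find s [d] = x ∧ pvKeep d = false := by
      rcases hd with h|h|h|h <;> exact ⟨_, h.symm, by decide⟩
    rw [← hxd] at h0
    obtain ⟨hpre, _⟩ := PySem.Chars.find_spec h0
    have hat : s[(PySem.Chars.find s [d]).toNat]? = some d :=
      (singleton_prefix_drop s d _).1 hpre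
    by_contra hlt
    push_neg at hlt
    have hkn : (PySem.Chars.find s [d]).toNat < n := by
      rw [hxd] at *; omega
    have := takeWhile_before pvKeep s _ hkn d hat
    rw [hdk] at this; exact absurd this (by simp)
  by_cases hcase : n < s.length
  · -- a delimiter occurs: s[n] is one, its find is exactly n, so min hits = n
    obtain ⟨c, hc⟩ : ∃ c, s[n]? = some c := ⟨s[n], List.getElem?_eq_getElem hcase⟩
    have hck : pvKeep c = false := takeWhile_after pvKeep s c hc
    have hfind : PySem.Chars.find s [c] = (n : Int) := by
      apply find_single_eq s c n hc
      intro i hi heq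
      have := takeWhile_before pvKeep s i hi c heq
      rw [hck] at this; exact absurd this (by simp)
    have hcdel : c = '#' ∨ c = '\'' ∨ c = '(' ∨ c = '{' := by
      simp [pvKeep] at hck
      tauto
    have hnin : (n : Int) ∈ hits := by
      rw [hmem]
      refine ⟨?_, by omega⟩
      rcases hcdel with h|h|h|h <;> rw [h] at hfind <;> simp [hfind]
    rcases hmq : PySem.List.min? hits (fun x => x) with _ | m
    · rw [PySem.List.min?_eq_none_iff] at hmq
      rw [hmq] at hnin; simp at hnin
    · have hm1 : m ∈ hits := PySem.List.min?_mem hmq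
      have hm2 : (m : Int) ≤ (n : Int) := PySem.List.min?_isMin hmq _ hnin
      have hm3 : (n : Int) ≤ m := hlb m hm1
      have hmn : m = (n : Int) := le_antisymm hm2 hm3
      simp only [hmn]
      rw [PySem.List.slice_to_natCast, take_takeWhile]
  · -- no delimiter in s: every find is -1, hits = [], idx = len, slice = whole s
    push_neg at hcase
    have htws : s.takeWhile pvKeep = s := by
      have hpre := List.takeWhile_prefix (l := s) pvKeep
      exact List.IsPrefix.eq_of_length hpre (le_antisymm (List.takeWhile_prefix pvKeep).length_le hcase)
    have hempty : hits = [] := by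
      rw [List.eq_nil_iff_forall_not_mem]
      intro x hx
      have := hlb x hx
      rw [hmem] at hx
      obtain ⟨hd, hne⟩ := hx
      have h0 : 0 ≤ x := by
        have : -1 ≤ x := by
          rcases hd with h|h|h|h <;> rw [h] <;> exact PySem.Chars.neg_one_le_find s _
        omega
      obtain ⟨d, hxd, hdk : pvKeep d = false⟩ :
          ∃ d, PySem.Chars.find s [d] = x ∧ pvKeep d = false := by
        rcases hd with h|h|h|h <;> exact ⟨_, h.symm, by decide⟩
      rw [← hxd] at h0
      obtain ⟨hpre, _⟩ := PySem.Chars.find_spec h0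
      have hat : s[(PySem.Chars.find s [d]).toNat]? = some d :=
        (singleton_prefix_drop s d _).1 hpre
      have hlt : (PySem.Chars.find s [d]).toNat < s.length :=
        List.getElem?_eq_some_iff.1 hat |>.1
      have hlt2 : (PySem.Chars.find s [d]).toNat < (s.takeWhile pvKeep).length := by
        rw [htws]; exact hlt
      have := takeWhile_before pvKeep s _ hlt2 d hat
      rw [hdk] at this; exact absurd this (by simp)
    have hnone : PySem.List.min? ([] : List Int) (fun x => x) = none :=
      (PySem.List.min?_eq_none_iff _ _).2 rfl
    rw [hempty, hnone]
    show String.ofList (s.takeWhile pvKeep ++ [' ']) =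
      String.ofList (PySem.List.slice s none (some ((s.length : ℕ) : Int)) ++ [' '])
    rw [PySem.List.slice_to_natCast, List.take_length, htws]
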